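-- pv_equiv track=rewrite | github.com/SriVidyaKotamarthi/Amatya | backend/genaitool/views.py | set_priorities
-- ===== SOURCE A (Python) =====
-- default_ranking = [
--     ("Basic Infrastructure", "Underground Water Availability"),
--     ("Basic Infrastructure", "Electricity Supply"),
--     ("Basic Infrastructure", "Drainage System"),
--     ("Basic Infrastructure", "Sewage System"),
--     ("Basic Infrastructure", "Road Quality"),
--     ("Basic Infrastructure", "Public Lighting"),
--     ("Legal & Safety Concerns", "Legal Status of the Land"),
--     ("Legal & Safety Concerns", "Crime Rate"),
--     ("Legal & Safety Concerns", "Emergency Services"),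
--     ("Legal & Safety Concerns", "Building Safety"),
--     ("Environmental Factors", "Air Quality Index (AQI)"),
--     ("Environmental Factors", "Proximity to Polluting Industries"),
--     ("Environmental Factors", "Noise Levels"),
--     ("Environmental Factors", "Green Spaces"),
--     ("Environmental Factors", "Flooding Risk"),
--     ("Connectivity & Commute", "Public Transport"),
--     ("Connectivity & Commute", "Road Connectivity"),
--     ("Connectivity & Commute", "Traffic Conditions"),
--     ("Connectivity & Commute", "Proximity to Workplaces"),
--     ("Social Amenities", "Schools and Educational Institutions"),
--     ("Social Amenities", "Healthcare Facilities"),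
--     ("Social Amenities", "Shopping and Grocery"),
--     ("Social Amenities", "Food Outlets"),
--     ("Social Amenities", "Entertainment & Leisure"),
--     ("Community & Lifestyle", "Peaceful Living"),
--     ("Community & Lifestyle", "Social Reviews and Reputation"),
--     ("Community & Lifestyle", "Diversity & Inclusivity"),
--     ("Community & Lifestyle", "Sense of Community"),
--     ("Economic Considerations", "Property Prices"),
--     ("Economic Considerations", "Rental Yield and Investment Potential"),
--     ("Economic Considerations", "Cost of Living"),
--     ("Economic Considerations", "Maintenance Costs"),
--     ("Urban Planning and Development", "Future Development Plans"),
--     ("Urban Planning and Development", "Zoning Regulations"),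
--     ("Urban Planning and Development", "Nearby Construction Projects"),
--     ("Technology & Utilities", "Internet & Telecom Connectivity"),
--     ("Technology & Utilities", "Garbage Collection and Recycling"),
--     ("Climate and Weather Considerations", "Temperature Extremes"),
--     ("Climate and Weather Considerations", "Wind Patterns"),
--     ("Miscellaneous Factors", "Pet-friendliness"),
--     ("Miscellaneous Factors", "Cultural and Religious Centers"),
--     ("Miscellaneous Factors", "Proximity to Workspaces/Co-working Spaces"),
--     ("Miscellaneous Factors", "Public Spaces"),
-- ]
--
-- def set_priorities(user_priorities=None):
--     """
--     This function takes a dictionary of user_priorities and returns a list of all criteria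
--     in the correct priority order. It handles cases where the user gives priority to either
--     categories or specific topics in "Miscellaneous Factors."
--
--     :param user_priorities: Dictionary where the key is the user priority (1, 2, 3...)
--                             and the value is either a category or a specific topic.
--     :return: List of all criteria ordered by priority.
--     """
--
--     # If no user priorities are provided, return the default ranking
--     if not user_priorities:
--         return default_ranking
--
--     # Initialize the result list for ordered priorities
--     ordered_priorities = []
--
--     # Keep track of which categories or topics have already been assigned by the user
--     assigned_categories = set()
--     assigned_topics = set()
--
--     # Step 1: Assign user-defined category and topic priorities
--     for priority in sorted(user_priorities):
--         selection = user_priorities[priority]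
--
--         # Check if the selection is a category (handle whole categories)
--         category_matched = False
--         for cat, topic in default_ranking:
--             if selection == cat and cat not in assigned_categories:
--                 ordered_priorities.extend([(cat, t) for c, t in default_ranking if c == cat])
--                 assigned_categories.add(cat)
--                 category_matched = True
--                 break
--
--         # If it's not a category, it could be a specific topic (handle topics like Miscellaneous)
--         if not category_matched:
--             for cat, topic in default_ranking:
--                 if topic == selection and (cat, topic) not in assigned_topics:
--                     ordered_priorities.append((cat, topic))
--                     assigned_topics.add((cat, topic))
--                     break
--
--     # Step 2: Append the remaining default priorities in their original order
--     for cat, topic in default_ranking: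
--         if (cat not in assigned_categories) and ((cat, topic) not in assigned_topics):
--             ordered_priorities.append((cat, topic))
--
--     return ordered_priorities
-- ===== SOURCE B (Python) =====
-- default_ranking = [
--     ("Basic Infrastructure", "Underground Water Availability"),
--     ("Basic Infrastructure", "Electricity Supply"),
--     ("Basic Infrastructure", "Drainage System"),
--     ("Basic Infrastructure", "Sewage System"),
--     ("Basic Infrastructure", "Road Quality"),
--     ("Basic Infrastructure", "Public Lighting"),
--     ("Legal & Safety Concerns", "Legal Status of the Land"),
--     ("Legal & Safety Concerns", "Crime Rate"),
--     ("Legal & Safety Concerns", "Emergency Services"),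
--     ("Legal & Safety Concerns", "Building Safety"),
--     ("Environmental Factors", "Air Quality Index (AQI)"),
--     ("Environmental Factors", "Proximity to Polluting Industries"),
--     ("Environmental Factors", "Noise Levels"),
--     ("Environmental Factors", "Green Spaces"),
--     ("Environmental Factors", "Flooding Risk"),
--     ("Connectivity & Commute", "Public Transport"),
--     ("Connectivity & Commute", "Road Connectivity"),
--     ("Connectivity & Commute", "Traffic Conditions"),
--     ("Connectivity & Commute", "Proximity to Workplaces"),
--     ("Social Amenities", "Schools and Educational Institutions"),
--     ("Social Amenities", "Healthcare Facilities"),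
--     ("Social Amenities", "Shopping and Grocery"),
--     ("Social Amenities", "Food Outlets"),
--     ("Social Amenities", "Entertainment & Leisure"),
--     ("Community & Lifestyle", "Peaceful Living"),
--     ("Community & Lifestyle", "Social Reviews and Reputation"),
--     ("Community & Lifestyle", "Diversity & Inclusivity"),
--     ("Community & Lifestyle", "Sense of Community"),
--     ("Economic Considerations", "Property Prices"),
--     ("Economic Considerations", "Rental Yield and Investment Potential"),
--     ("Economic Considerations", "Cost of Living"),
--     ("Economic Considerations", "Maintenance Costs"),
--     ("Urban Planning and Development", "Future Development Plans"),
--     ("Urban Planning and Development", "Zoning Regulations"),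
--     ("Urban Planning and Development", "Nearby Construction Projects"),
--     ("Technology & Utilities", "Internet & Telecom Connectivity"),
--     ("Technology & Utilities", "Garbage Collection and Recycling"),
--     ("Climate and Weather Considerations", "Temperature Extremes"),
--     ("Climate and Weather Considerations", "Wind Patterns"),
--     ("Miscellaneous Factors", "Pet-friendliness"),
--     ("Miscellaneous Factors", "Cultural and Religious Centers"),
--     ("Miscellaneous Factors", "Proximity to Workspaces/Co-working Spaces"),
--     ("Miscellaneous Factors", "Public Spaces"),
-- ]
--
-- def set_priorities(user_priorities=None):
--     """Same result as the original, but the inner scans over default_ranking are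
--     replaced by two indexes built in one pass: category -> its entries, topic -> its entry."""
--     if not user_priorities:
--         return default_ranking
--
--     cat_to_entries = {}
--     topic_to_entry = {}
--     for cat, topic in default_ranking:
--         cat_to_entries[cat] = cat_to_entries.get(cat, []) + [(cat, topic)]
--         topic_to_entry[topic] = (cat, topic)
--
--     ordered_priorities = []
--     assigned_categories = set()
--     assigned_topics = set()
--     for priority in sorted(user_priorities):
--         selection = user_priorities[priority]
--         if selection in cat_to_entries:
--             if selection not in assigned_categories:
--                 ordered_priorities.extend(cat_to_entries[selection])
--                 assigned_categories.add(selection)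
--         else:
--             entry = topic_to_entry.get(selection)
--             if entry is not None and entry not in assigned_topics:
--                 ordered_priorities.append(entry)
--                 assigned_topics.add(entry)
--
--     for cat, topic in default_ranking:
--         if cat not in assigned_categories and (cat, topic) not in assigned_topics:
--             ordered_priorities.append((cat, topic))
--     return ordered_priorities
-- ===== Notes on version B (the rewrite author's own statement) =====
-- stated objective: faster
-- what changed: The per-priority linear scans over default_ranking (and the per-category list comprehension) are replaced by two indexes built once in a single pass - category -> its entries and topic -> its entry - so each selection is handled by O(1) dictionary lookups.
import Mathlib
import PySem

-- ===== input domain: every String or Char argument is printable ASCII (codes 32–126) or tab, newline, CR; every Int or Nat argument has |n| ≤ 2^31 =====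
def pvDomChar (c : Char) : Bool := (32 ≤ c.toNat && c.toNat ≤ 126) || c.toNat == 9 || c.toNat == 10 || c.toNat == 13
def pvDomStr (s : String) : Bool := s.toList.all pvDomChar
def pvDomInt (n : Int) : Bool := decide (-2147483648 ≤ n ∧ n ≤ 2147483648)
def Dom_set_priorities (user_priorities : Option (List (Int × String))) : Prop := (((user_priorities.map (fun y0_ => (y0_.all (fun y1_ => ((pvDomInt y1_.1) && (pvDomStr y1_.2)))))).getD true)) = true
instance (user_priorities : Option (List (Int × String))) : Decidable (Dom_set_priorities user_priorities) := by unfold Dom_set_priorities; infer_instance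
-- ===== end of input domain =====

-- ===== PORT A =====
-- One honest line: B replaces A's inner scans of default_ranking with two prebuilt indexes
-- (category -> entries, topic -> entry); same return value, a simpler per-selection step.
def default_ranking : List (String × String) := [
  ("Basic Infrastructure", "Underground Water Availability"),
  ("Basic Infrastructure", "Electricity Supply"),
  ("Basic Infrastructure", "Drainage System"),
  ("Basic Infrastructure", "Sewage System"),
  ("Basic Infrastructure", "Road Quality"),
  ("Basic Infrastructure", "Public Lighting"),
  ("Legal & Safety Concerns", "Legal Status of the Land"),
  ("Legal & Safety Concerns", "Crime Rate"),
  ("Legal & Safety Concerns", "Emergency Services"),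
  ("Legal & Safety Concerns", "Building Safety"),
  ("Environmental Factors", "Air Quality Index (AQI)"),
  ("Environmental Factors", "Proximity to Polluting Industries"),
  ("Environmental Factors", "Noise Levels"),
  ("Environmental Factors", "Green Spaces"),
  ("Environmental Factors", "Flooding Risk"),
  ("Connectivity & Commute", "Public Transport"),
  ("Connectivity & Commute", "Road Connectivity"),
  ("Connectivity & Commute", "Traffic Conditions"),
  ("Connectivity & Commute", "Proximity to Workplaces"),
  ("Social Amenities", "Schools and Educational Institutions"),
  ("Social Amenities", "Healthcare Facilities"),
  ("Social Amenities", "Shopping and Grocery"),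
  ("Social Amenities", "Food Outlets"),
  ("Social Amenities", "Entertainment & Leisure"),
  ("Community & Lifestyle", "Peaceful Living"),
  ("Community & Lifestyle", "Social Reviews and Reputation"),
  ("Community & Lifestyle", "Diversity & Inclusivity"),
  ("Community & Lifestyle", "Sense of Community"),
  ("Economic Considerations", "Property Prices"),
  ("Economic Considerations", "Rental Yield and Investment Potential"),
  ("Economic Considerations", "Cost of Living"),
  ("Economic Considerations", "Maintenance Costs"),
  ("Urban Planning and Development", "Future Development Plans"),
  ("Urban Planning and Development", "Zoning Regulations"),
  ("Urban Planning and Development", "Nearby Construction Projects"),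
  ("Technology & Utilities", "Internet & Telecom Connectivity"),
  ("Technology & Utilities", "Garbage Collection and Recycling"),
  ("Climate and Weather Considerations", "Temperature Extremes"),
  ("Climate and Weather Considerations", "Wind Patterns"),
  ("Miscellaneous Factors", "Pet-friendliness"),
  ("Miscellaneous Factors", "Cultural and Religious Centers"),
  ("Miscellaneous Factors", "Proximity to Workspaces/Co-working Spaces"),
  ("Miscellaneous Factors", "Public Spaces")]

-- state of A's and B's main loop: (ordered_priorities, assigned_categories, assigned_topics)
abbrev SPState := List (String × String) × PySem.Set String × PySem.Set (String × String)

-- the body of A's 'for priority in sorted(user_priorities)' loop, for one selection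
def aStep (selection : String) (st : SPState) : SPState :=
  match default_ranking.find? (fun ct => selection == ct.1 && !(PySem.Set.contains st.2.1 ct.1)) with
  | some (cat, _) =>
      (st.1 ++ (default_ranking.filter (fun ct => ct.1 == cat)).map (fun ct => (cat, ct.2)),
       PySem.Set.add st.2.1 cat, st.2.2)
  | none =>
      match default_ranking.find? (fun ct => ct.2 == selection && !(PySem.Set.contains st.2.2 ct)) with
      | some ct => (st.1 ++ [ct], st.2.1, PySem.Set.add st.2.2 ct)
      | none => st

def set_priorities (user_priorities : Option (List (Int × String))) : List (String × String) :=
  match user_priorities with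
  | none => default_ranking
  | some ps =>
    if ps.isEmpty then default_ranking else
    let d : PySem.Dict Int String := PySem.Dict.ofList ps
    let st : SPState :=
      (PySem.List.sorted d.keys (fun k => k) false).foldl
        (fun st priority => aStep ((d.get? priority).getD "") st)
        ([], PySem.Set.empty, PySem.Set.empty)
    st.1 ++ default_ranking.filter
      (fun ct => !(PySem.Set.contains st.2.1 ct.1) && !(PySem.Set.contains st.2.2 ct))

-- ===== PORT B =====
-- cat_to_entries / topic_to_entry, each built in one pass over default_ranking
def catToEntries : PySem.Dict String (List (String × String)) :=
  default_ranking.foldl (fun d ct => d.modify ct.1 [] (· ++ [ct])) PySem.Dict.empty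

def topicToEntry : PySem.Dict String (String × String) :=
  default_ranking.foldl (fun d ct => d.insert ct.2 ct) PySem.Dict.empty

def bStep (selection : String) (st : SPState) : SPState :=
  if (catToEntries.get? selection).isSome then
    if PySem.Set.contains st.2.1 selection then st
    else (st.1 ++ catToEntries.getD selection [], PySem.Set.add st.2.1 selection, st.2.2)
  else
    match topicToEntry.get? selection with
    | some e =>
        if PySem.Set.contains st.2.2 e then st
        else (st.1 ++ [e], st.2.1, PySem.Set.add st.2.2 e)
    | none => st

def set_priorities_alt (user_priorities : Option (List (Int × String))) : List (String × String) :=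
  match user_priorities with
  | none => default_ranking
  | some ps =>
    if ps.isEmpty then default_ranking else
    let d : PySem.Dict Int String := PySem.Dict.ofList ps
    let st : SPState :=
      (PySem.List.sorted d.keys (fun k => k) false).foldl
        (fun st priority => bStep ((d.get? priority).getD "") st)
        ([], PySem.Set.empty, PySem.Set.empty)
    st.1 ++ default_ranking.filter
      (fun ct => !(PySem.Set.contains st.2.1 ct.1) && !(PySem.Set.contains st.2.2 ct))

-- ===== PRECONDITION & SPEC =====
def Spec_set_priorities (user_priorities : Option (List (Int × String))) (out : List (String × String)) : Prop := out = set_priorities_alt user_priorities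
instance (user_priorities : Option (List (Int × String))) (out : List (String × String)) : Decidable (Spec_set_priorities user_priorities out) := by unfold Spec_set_priorities; infer_instance

-- ===== CLAIM (what is proved, stated in full; the proofs are below) =====
def Claim_equal_set_priorities : Prop := ∀ (user_priorities : Option (List (Int × String))), Dom_set_priorities user_priorities → Spec_set_priorities user_priorities (set_priorities user_priorities)

-- ===== LEMMAS AND PROOFS =====

-- A's category scan: entries whose category is already assigned never match, others match iff cat = selection
theorem find_cat_scan (l : List (String × String)) (ac : PySem.Set String) (s : String) :
    l.find? (fun ct => s == ct.1 && !decide (ct.1 ∈ ac)) =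
      if s ∈ ac then none else l.find? (fun ct => s == ct.1) := by
  induction l with
  | nil => by_cases hm : s ∈ ac <;> simp [hm]
  | cons x l ih =>
    obtain ⟨a, b⟩ := x
    by_cases hx : s = a
    · subst hx
      by_cases hm : s ∈ ac
      · simp only [List.find?_cons]
        simp [hm, ih]
      · simp [hm]
    · have hb : (s == a) = false := by simp [hx]
      by_cases hm : s ∈ ac <;> simp [hb, hm, ih]

-- A's topic scan over a topic-distinct list: the unique matching entry, unless already assigned
theorem find_topic_scan (l : List (String × String)) (at' : PySem.Set (String × String)) (s : String)
    (hnd : (l.map (fun ct => ct.2)).Nodup) :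
    l.find? (fun ct => ct.2 == s && !decide (ct ∈ at')) =
      (match l.find? (fun ct => ct.2 == s) with
       | some e => if e ∈ at' then none else some e
       | none => none) := by
  induction l with
  | nil => simp
  | cons x l ih =>
    simp only [List.map_cons, List.nodup_cons] at hnd
    by_cases hx : x.2 = s
    · have hnone : l.find? (fun ct => ct.2 == s && !decide (ct ∈ at')) = none := by
        rw [List.find?_eq_none]
        intro y hy
        have hne : y.2 ≠ s := by
          intro he
          apply hnd.1
          rw [hx, ← he]
          exact List.mem_map_of_mem hy
        simp [hne]
      by_cases hm : x ∈ at'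
      · simp [hx, hm, hnone]
      · simp [hx, hm]
    · have hb : (x.2 == s) = false := by simp [hx]
      simp [hb, ih hnd.2]

-- inserting under keys all different from s does not change lookup at s
theorem get?_insert_fold_of_ne (l : List (String × String)) (d : PySem.Dict String (String × String))
    (s : String) (h : ∀ x ∈ l, x.2 ≠ s) :
    (l.foldl (fun d x => d.insert x.2 x) d).get? s = d.get? s := by
  induction l generalizing d with
  | nil => rfl
  | cons x l ih =>
    simp only [List.foldl_cons]
    rw [ih _ (fun y hy => h y (List.mem_cons_of_mem _ hy)), PySem.Dict.get?_insert_of_ne]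
    exact Ne.symm (h x (by simp))

-- lookup in the insert-built topic index = first (= unique) matching entry
theorem get?_insert_fold (l : List (String × String)) (d : PySem.Dict String (String × String))
    (s : String) (hnd : (l.map (fun ct => ct.2)).Nodup) :
    (l.foldl (fun d x => d.insert x.2 x) d).get? s =
      (match l.find? (fun ct => ct.2 == s) with
       | some e => some e
       | none => d.get? s) := by
  induction l generalizing d with
  | nil => simp
  | cons x l ih =>
    simp only [List.map_cons, List.nodup_cons] at hnd
    simp only [List.foldl_cons]
    by_cases hx : x.2 = s
    · rw [get?_insert_fold_of_ne _ _ _ (fun y hy he => hnd.1 (by rw [hx, ← he]; exact List.mem_map_of_mem hy))]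
      rw [hx, PySem.Dict.get?_insert_self]
      simp [hx]
    · have hb : (x.2 == s) = false := by simp [hx]
      rw [ih _ hnd.2]
      have hget : (d.insert x.2 x).get? s = d.get? s := by
        rw [PySem.Dict.get?_insert_of_ne]
        exact Ne.symm hx
      cases hf : l.find? (fun ct => ct.2 == s) <;>
        simp [hb, hf, hget]

theorem topics_nodup : (default_ranking.map (fun ct => ct.2)).Nodup := by decide

theorem cat_topic_disjoint :
    ∀ p ∈ default_ranking, ∀ q ∈ default_ranking, p.1 ≠ q.2 := by decide

theorem topicToEntry_get? (s : String) :
    topicToEntry.get? s =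
      (match default_ranking.find? (fun ct => ct.2 == s) with
       | some e => some e
       | none => none) := by
  rw [topicToEntry, get?_insert_fold _ _ _ topics_nodup]
  cases default_ranking.find? (fun ct => ct.2 == s) <;> rfl

theorem catToEntries_keys :
    catToEntries.keys = PySem.Set.ofList (default_ranking.map (fun ct => ct.1)) := by
  rw [catToEntries, PySem.Dict.keys_foldl_modify_key default_ranking (fun ct => ct.1)]
  rfl

theorem catToEntries_isSome (s : String) :
    (catToEntries.get? s).isSome = true ↔ s ∈ default_ranking.map (fun ct => ct.1) := by
  rw [Option.isSome_iff_ne_none, ne_eq, PySem.Dict.get?_eq_none_iff_not_mem_keys,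
      catToEntries_keys]
  simp [PySem.Set.mem_ofList]

theorem catToEntries_getD (s : String) :
    catToEntries.getD s [] = default_ranking.filter (fun ct => ct.1 == s) := by
  have h : catToEntries =
      (default_ranking.map (fun ct => (ct.1, ct))).foldl
        (fun d p => d.modify p.1 [] (· ++ [p.2])) PySem.Dict.empty := by
    rw [List.foldl_map]; rfl
  rw [h, PySem.Dict.getD_foldl_modify_append]
  simp [PySem.Dict.getD_empty, List.filter_map, List.map_map, Function.comp_def]

-- the block A appends for a matched category s is exactly the filter itself
theorem cat_block_map (l : List (String × String)) (s : String) :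
    (l.filter (fun ct => ct.1 == s)).map (fun ct => (s, ct.2)) = l.filter (fun ct => ct.1 == s) := by
  have h : ∀ ct ∈ l.filter (fun ct => ct.1 == s), (s, ct.2) = ct := by
    intro ct hct
    have h1 : (ct.1 == s) = true := (List.mem_filter.mp hct).2
    obtain ⟨c1, c2⟩ := ct
    simp only [beq_iff_eq] at h1
    simp [h1]
  rw [List.map_congr_left h, List.map_id']

-- the two loop bodies agree on every selection and state
theorem step_eq (s : String) (st : SPState) : aStep s st = bStep s st := by
  obtain ⟨o, ac, at'⟩ := st
  have hC := find_cat_scan default_ranking ac s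
  have hT := find_topic_scan default_ranking at' s topics_nodup
  by_cases hcat : s ∈ default_ranking.map (fun ct => ct.1)
  · obtain ⟨x, hxmem, hxs⟩ := List.mem_map.mp hcat
    have hsome : (default_ranking.find? (fun ct => s == ct.1)).isSome = true := by
      rw [List.find?_isSome]
      exact ⟨x, hxmem, by simp [hxs]⟩
    obtain ⟨e, he⟩ := Option.isSome_iff_exists.mp hsome
    have he1 : e.1 = s := by
      have := List.find?_some he
      simp only [beq_iff_eq] at this
      exact this.symm
    have hemem : e ∈ default_ranking := List.mem_of_find?_eq_some he
    have hcsome : (catToEntries.get? s).isSome = true := (catToEntries_isSome s).mpr hcat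
    by_cases hac : s ∈ ac
    · have htopic : default_ranking.find? (fun ct => ct.2 == s) = none := by
        rw [List.find?_eq_none]
        intro y hy
        have hne : e.1 ≠ y.2 := cat_topic_disjoint e hemem y hy
        rw [he1] at hne
        simp [Ne.symm hne]
      simp [aStep, bStep, hC, hT, hac, htopic, hcsome, PySem.Set.contains]
    · simp only [aStep, bStep, PySem.Set.contains, List.contains_eq_mem]
      simp only [hC]
      simp [hac, he, hcsome, he1, catToEntries_getD, cat_block_map, PySem.Set.add,
            PySem.Set.contains]
  · have hnone : default_ranking.find? (fun ct => s == ct.1) = none := by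
      rw [List.find?_eq_none]
      intro y hy
      have hne : y.1 ≠ s := fun he' => hcat (he' ▸ List.mem_map_of_mem hy)
      simp [Ne.symm hne]
    have hcnone : catToEntries.get? s = none := by
      rcases hq : catToEntries.get? s with _ | v
      · rfl
      · exact absurd ((catToEntries_isSome s).mp (by rw [hq]; rfl)) hcat
    have hTT := topicToEntry_get? s
    rcases hf : default_ranking.find? (fun ct => ct.2 == s) with _ | e
    · simp [aStep, bStep, hC, hT, hnone, hcnone, hTT, hf, PySem.Set.contains]
    · by_cases hat : e ∈ at' <;>
        simp [aStep, bStep, hC, hT, hnone, hcnone, hTT, hf, hat, PySem.Set.contains,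
              PySem.Set.add]

-- ===== VERDICT (by name: the statement is the Claim_ definition above) =====
theorem set_priorities_spec : Claim_equal_set_priorities := by
  intro up _
  unfold Spec_set_priorities set_priorities set_priorities_alt
  cases up with
  | none => rfl
  | some ps =>
    have hfun : ∀ (d : PySem.Dict Int String),
        (fun (st : SPState) (priority : Int) => aStep ((d.get? priority).getD "") st)
          = fun (st : SPState) (priority : Int) => bStep ((d.get? priority).getD "") st := by
      intro d
      funext st p
      exact step_eq _ st
    by_cases h : ps.isEmpty <;> simp only [h, if_true, if_false, Bool.false_eq_true, hfun]
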